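-- pv_equiv track=rewrite | github.com/karu9/adventcalendar4 | src/day5/day5.py | reduc
-- ===== SOURCE A (Python) =====
-- def reduc(text):
--     dups = []
--     x = 0
--     while x < len(text) - 1:
--         if text[x].lower() == text[x+1].lower() and not text[x] == text[x+1]:
--             dups.append(x)
--             x = x + 1
--         x = x + 1
--     for y in dups[::-1] :
--         text = text[:y] + text[y+2:]
--     return text
-- ===== SOURCE B (Python) =====
-- def reduc(text):
--     # One forward pass over a once-lowercased copy: skip each reacting
--     # (case-mismatch) pair, copy everything else into an output buffer.
--     low = text.lower()
--     out = []
--     app = out.append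
--     n = len(text)
--     i = 0
--     while i < n:
--         if i + 1 < n and low[i] == low[i + 1] and text[i] != text[i + 1]:
--             i += 2
--         else:
--             app(text[i])
--             i += 1
--     return ''.join(out)
-- ===== Notes on version B (the rewrite author's own statement) =====
-- stated objective: faster
-- what changed: Instead of collecting pair indices and then rebuilding the string once per pair by slicing, B lowercases the string once and does a single forward pass that skips each reacting pair and appends the surviving characters to an output buffer.
import Mathlib
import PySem

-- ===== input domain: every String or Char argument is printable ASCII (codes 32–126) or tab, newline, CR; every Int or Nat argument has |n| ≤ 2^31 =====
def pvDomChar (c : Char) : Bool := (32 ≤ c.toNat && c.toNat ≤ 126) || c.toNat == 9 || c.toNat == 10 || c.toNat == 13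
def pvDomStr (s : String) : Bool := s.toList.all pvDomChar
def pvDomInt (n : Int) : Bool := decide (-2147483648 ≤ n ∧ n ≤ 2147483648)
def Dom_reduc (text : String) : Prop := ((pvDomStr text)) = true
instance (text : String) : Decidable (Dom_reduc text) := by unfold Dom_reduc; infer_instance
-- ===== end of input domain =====

-- B replaces A's collect-indices-then-delete-by-slicing scheme with one forward pass
-- that skips reacting pairs and appends survivors (no per-pair string rebuild).

-- ===== PORT A =====
-- while loop collecting indices of reacting pairs (text[x] accessed with getD:
-- the loop condition guarantees x and x+1 are in range, so getD = Python indexing)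
-- (fuel = remaining iterations; cs.length is always enough since x grows each step)
def reducScanA (cs : List Char) (x : Nat) : Nat → List Nat
  | 0 => []
  | fuel + 1 =>
    if x < cs.length - 1 then
      if PySem.Chars.lowerChar (cs.getD x ' ') == PySem.Chars.lowerChar (cs.getD (x+1) ' ')
          && !(cs.getD x ' ' == cs.getD (x+1) ' ') then
        x :: reducScanA cs (x + 2) fuel
      else
        reducScanA cs (x + 1) fuel
    else []

-- text = text[:y] + text[y+2:]
def reducDel (t : List Char) (y : Nat) : List Char :=
  PySem.List.slice t none (some (y : Int)) ++ PySem.List.slice t (some ((y : Int) + 2)) none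

def reduc (text : String) : String :=
  String.mk (((reducScanA text.toList 0 text.toList.length).reverse).foldl reducDel text.toList)

-- ===== PORT B =====
-- single forward pass with an output accumulator (out.append / i += 1 or 2);
-- low = text.lower() computed once (PySem.Str.lower on the list side is PySem.Chars.lower)
def reducScanB (cs low : List Char) (i : Nat) (out : List Char) : Nat → List Char
  | 0 => out
  | fuel + 1 =>
    if i < cs.length then
      if decide (i + 1 < cs.length)
          && (low.getD i ' ' == low.getD (i+1) ' ')
          && !(cs.getD i ' ' == cs.getD (i+1) ' ') then
        reducScanB cs low (i + 2) out fuel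
      else
        reducScanB cs low (i + 1) (out ++ [cs.getD i ' ']) fuel
    else out

def reduc_alt (text : String) : String :=
  String.mk (reducScanB text.toList (PySem.Chars.lower text.toList) 0 [] text.toList.length)

-- ===== PRECONDITION & SPEC =====
def Spec_reduc (text : String) (out : String) : Prop := out = reduc_alt text
instance (text : String) (out : String) : Decidable (Spec_reduc text out) := by unfold Spec_reduc; infer_instance

-- ===== CLAIM (what is proved, stated in full; the proofs are below) =====
def Claim_equal_reduc : Prop := ∀ (text : String), Dom_reduc text → Spec_reduc text (reduc text)

-- ===== LEMMAS AND PROOFS =====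

-- the reaction test
def reacts (a b : Char) : Bool :=
  (PySem.Chars.lowerChar a == PySem.Chars.lowerChar b) && !(a == b)

-- structural one-pass reduction (proof-side reference function)
def red : List Char → List Char
  | [] => []
  | [c] => [c]
  | a :: b :: rest => if reacts a b then red rest else a :: red (b :: rest)

-- structural pair-index list
def dupsS : List Char → List Nat
  | [] => []
  | [_] => []
  | a :: b :: rest => if reacts a b then 0 :: (dupsS rest).map (· + 2)
                      else (dupsS (b :: rest)).map (· + 1)

theorem getD_drop_zero (cs : List Char) (x : Nat) (d : Char) :
    cs.getD x d = (cs.drop x).getD 0 d := by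
  simp [List.getD, List.getElem?_drop]

theorem drop_succ_tail (cs : List Char) (x : Nat) :
    cs.drop (x + 1) = (cs.drop x).tail := List.tail_drop.symm

theorem scanA_eq_dupsS (cs : List Char) (fuel : Nat) :
    ∀ (x : Nat), cs.length ≤ fuel + x →
      reducScanA cs x fuel = (dupsS (cs.drop x)).map (· + x) := by
  induction fuel with
  | zero =>
    intro x hle
    rw [List.drop_eq_nil_iff.mpr (by omega)]
    rfl
  | succ fuel ih =>
    intro x hle
    simp only [reducScanA]
    by_cases hx : x < cs.length - 1
    · rw [if_pos hx]
      by_cases hr : (PySem.Chars.lowerChar (cs.getD x ' ') == PySem.Chars.lowerChar (cs.getD (x+1) ' ')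
          && !(cs.getD x ' ' == cs.getD (x+1) ' ')) = true
      · rw [if_pos hr]
        obtain ⟨a, b, r, hd⟩ : ∃ a b r, cs.drop x = a :: b :: r := by
          have h2 : 2 ≤ (cs.drop x).length := by simp; omega
          match h : cs.drop x with
          | a :: b :: r => exact ⟨a, b, r, rfl⟩
          | [] | [a] => simp [h] at h2
        have hd1 : cs.drop (x+1) = b :: r := by rw [drop_succ_tail, hd]; rfl
        have hd2 : cs.drop (x+2) = r := by rw [drop_succ_tail, hd1]; rfl
        have ha : cs.getD x ' ' = a := by rw [getD_drop_zero, hd]; rfl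
        have hb : cs.getD (x+1) ' ' = b := by rw [getD_drop_zero, hd1]; rfl
        have hre : reacts a b = true := by rw [reacts, ← ha, ← hb]; exact hr
        rw [ih (x+2) (by omega), hd, hd2, dupsS, if_pos hre]
        simp only [List.map_cons, List.map_map, Nat.zero_add, List.cons.injEq, true_and]
        exact List.map_congr_left (fun y _ => by simp only [Function.comp_apply]; omega)
      · rw [if_neg hr]
        obtain ⟨a, r, hd⟩ : ∃ a r, cs.drop x = a :: r := by
          match h : cs.drop x with
          | a :: r => exact ⟨a, r, rfl⟩
          | [] => have := List.drop_eq_nil_iff.mp h; omega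
        have hd1 : cs.drop (x+1) = r := by rw [drop_succ_tail, hd]; rfl
        have ha : cs.getD x ' ' = a := by rw [getD_drop_zero, hd]; rfl
        rw [ih (x+1) (by omega), hd, hd1]
        match r with
        | [] => simp [dupsS]
        | b :: r' =>
          have hb : cs.getD (x+1) ' ' = b := by rw [getD_drop_zero, hd1]; rfl
          have hre : reacts a b = false := by
            rw [reacts, ← ha, ← hb]; simpa using hr
          rw [dupsS, if_neg (by simp [hre])]
          simp only [List.map_map]
          exact List.map_congr_left (fun y _ => by simp only [Function.comp_apply]; omega)
    · rw [if_neg hx]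
      rcases Nat.lt_or_ge x cs.length with hxl | hxl
      · have h1 : cs.drop x = [cs.getD x ' '] := by
          have hl : (cs.drop x).length = 1 := by simp; omega
          match hh : cs.drop x with
          | [c] =>
            have : cs.getD x ' ' = c := by rw [getD_drop_zero, hh]; rfl
            rw [this]
          | [] | _ :: _ :: _ => simp [hh] at hl
        rw [h1]; rfl
      · rw [List.drop_eq_nil_iff.mpr (by omega)]; rfl

-- deleting a shifted index commutes with a fixed prefix
theorem del_shift (t : List Char) (a : Char) (y : Nat) :
    reducDel (a :: t) (y + 1) = a :: reducDel t y := by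
  simp only [reducDel]
  rw [show ((y + 1 : Nat) : Int) = ((y : Nat) : Int) + 1 by push_cast; ring] at *
  rw [show ((y : Int) + 1 + 2) = ((y + 3 : Nat) : Int) by push_cast; ring,
      show ((y : Int) + 2) = ((y + 2 : Nat) : Int) by push_cast; ring,
      show ((y : Int) + 1) = ((y + 1 : Nat) : Int) by push_cast; ring,
      PySem.List.slice_from_natCast, PySem.List.slice_from_natCast,
      PySem.List.slice_to_natCast, PySem.List.slice_to_natCast]
  simp

theorem foldl_del_shift (ys : List Nat) (a : Char) (t : List Char) :
    ys.foldl (fun s y => reducDel s (y + 1)) (a :: t) = a :: ys.foldl reducDel t := by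
  induction ys generalizing t with
  | nil => rfl
  | cons y ys ih => simp only [List.foldl_cons, del_shift]; exact ih (reducDel t y)

theorem foldl_del_shift2 (ys : List Nat) (a b : Char) (t : List Char) :
    ys.foldl (fun s y => reducDel s (y + 2)) (a :: b :: t) = a :: b :: ys.foldl reducDel t := by
  induction ys generalizing t with
  | nil => rfl
  | cons y ys ih =>
    have h : reducDel (a :: b :: t) (y + 2) = a :: b :: reducDel t y := by
      have h1 := del_shift (b :: t) a (y + 1)
      rw [del_shift t b y] at h1
      simpa using h1
    simp only [List.foldl_cons, h]; exact ih (reducDel t y)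

theorem del_zero (t : List Char) : reducDel t 0 = t.drop 2 := by
  rw [reducDel, show ((0 : Nat) : Int) + 2 = ((2 : Nat) : Int) by norm_num,
      PySem.List.slice_from_natCast]
  simp [PySem.List.slice]

theorem foldl_red (cs : List Char) :
    (dupsS cs).reverse.foldl reducDel cs = red cs := by
  fun_induction red cs with
  | case1 => rfl
  | case2 c => rfl
  | case3 a b rest hre ih =>
    rw [dupsS, if_pos hre]
    simp only [List.reverse_cons, List.foldl_append, List.foldl_cons, List.foldl_nil,
      ← List.map_reverse, List.foldl_map]
    rw [foldl_del_shift2, ih, del_zero]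
    rfl
  | case4 a b rest hre ih =>
    rw [dupsS, if_neg (by simp_all)]
    rw [← List.map_reverse, List.foldl_map, foldl_del_shift, ih]

theorem lower_getD (cs : List Char) (j : Nat) :
    (PySem.Chars.lower cs).getD j ' ' = PySem.Chars.lowerChar (cs.getD j ' ') := by
  simp only [PySem.Chars.lower, List.getD, List.getElem?_map]
  cases h : cs[j]? <;> simp [h] <;> decide

theorem scanB_eq (cs : List Char) (fuel : Nat) :
    ∀ (i : Nat) (out : List Char), cs.length ≤ fuel + i →
      reducScanB cs (PySem.Chars.lower cs) i out fuel = out ++ red (cs.drop i) := by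
  induction fuel with
  | zero =>
    intro i out hle
    rw [List.drop_eq_nil_iff.mpr (by omega)]
    simp [reducScanB, red]
  | succ fuel ih =>
    intro i out hle
    simp only [reducScanB, lower_getD]
    by_cases hlt : i < cs.length
    · rw [if_pos hlt]
      by_cases hc : (decide (i + 1 < cs.length)
          && (PySem.Chars.lowerChar (cs.getD i ' ') == PySem.Chars.lowerChar (cs.getD (i+1) ' '))
          && !(cs.getD i ' ' == cs.getD (i+1) ' ')) = true
      · rw [if_pos hc]
        simp only [Bool.and_eq_true, decide_eq_true_eq] at hc
        obtain ⟨⟨h1, h2⟩, h3⟩ := hc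
        obtain ⟨a, b, r, hd⟩ : ∃ a b r, cs.drop i = a :: b :: r := by
          have hl : 2 ≤ (cs.drop i).length := by simp; omega
          match h : cs.drop i with
          | a :: b :: r => exact ⟨a, b, r, rfl⟩
          | [] | [a] => simp [h] at hl
        have hd1 : cs.drop (i+1) = b :: r := by rw [drop_succ_tail, hd]; rfl
        have hd2 : cs.drop (i+2) = r := by rw [drop_succ_tail, hd1]; rfl
        have ha : cs.getD i ' ' = a := by rw [getD_drop_zero, hd]; rfl
        have hb : cs.getD (i+1) ' ' = b := by rw [getD_drop_zero, hd1]; rfl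
        have hre : reacts a b = true := by rw [reacts, ← ha, ← hb, h2, h3]; rfl
        rw [ih (i+2) out (by omega), hd2, hd, red, if_pos hre]
      · rw [if_neg hc]
        obtain ⟨a, r, hd⟩ : ∃ a r, cs.drop i = a :: r := by
          match h : cs.drop i with
          | a :: r => exact ⟨a, r, rfl⟩
          | [] => have := List.drop_eq_nil_iff.mp h; omega
        have hd1 : cs.drop (i+1) = r := by rw [drop_succ_tail, hd]; rfl
        have ha : cs.getD i ' ' = a := by rw [getD_drop_zero, hd]; rfl
        rw [ih (i+1) (out ++ [cs.getD i ' ']) (by omega), hd1, hd, ha]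
        match r with
        | [] => simp [red]
        | b :: r' =>
          have h1 : i + 1 < cs.length := by
            have hl : (cs.drop (i+1)).length = cs.length - (i+1) := by simp
            rw [hd1] at hl; simp at hl; omega
          have hb : cs.getD (i+1) ' ' = b := by rw [getD_drop_zero, hd1]; rfl
          have hre : reacts a b = false := by
            rw [reacts, ← ha, ← hb]
            simp only [h1, decide_true, Bool.true_and, Bool.not_eq_true] at hc
            exact hc
          rw [red, if_neg (by simp [hre])]
          simp
    · rw [if_neg hlt, List.drop_eq_nil_iff.mpr (by omega)]
      simp [red]

-- ===== VERDICT (by name: the statement is the Claim_ definition above) =====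
theorem reduc_spec : Claim_equal_reduc := by
  intro text _
  unfold Spec_reduc reduc reduc_alt
  rw [scanA_eq_dupsS text.toList text.toList.length 0 (by omega), scanB_eq text.toList text.toList.length 0 [] (by omega)]
  simp only [List.drop_zero, List.nil_append]
  have hm : List.map (fun x => x + 0) (dupsS text.toList) = dupsS text.toList := by simp
  rw [hm, foldl_red]
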